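-- pv_equiv track=rewrite | github.com/ccoder74/project_euler | p5_smallest_multiple.py | evenly_divisible
-- ===== SOURCE A (Python) =====
-- def evenly_divisible(n):
--     multipliers = []
--
--     for i in range(1, n + 1):
--         current_number = i
--
--         for element in multipliers:
--             if current_number % element == 0:
--                 current_number = int(current_number / element)
--
--         multipliers.append(current_number)
--
--     return multipliers
-- ===== SOURCE B (Python) =====
-- def evenly_divisible(n):
--     return [_multiplier(i) for i in range(1, n + 1)]
--
--
-- def _multiplier(i):
--     # The LCM-building multiplier for i: i's smallest prime factor p when i is a
--     # prime power p**k, otherwise 1.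
--     if i == 1:
--         return 1
--     p = 2
--     while p * p <= i and i % p != 0:
--         p += 1
--     if p * p > i:
--         p = i                      # i is prime
--     m = i
--     while m % p == 0:
--         m //= p
--     return p if m == 1 else 1
-- ===== Notes on version B (the rewrite author's own statement) =====
-- stated objective: faster
-- what changed: Instead of scanning the whole growing multipliers list for every i (O(n^2)), B computes each entry independently by trial division: find i's smallest prime factor p, strip all factors p, and emit p if i was a prime power, else 1.
import Mathlib
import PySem

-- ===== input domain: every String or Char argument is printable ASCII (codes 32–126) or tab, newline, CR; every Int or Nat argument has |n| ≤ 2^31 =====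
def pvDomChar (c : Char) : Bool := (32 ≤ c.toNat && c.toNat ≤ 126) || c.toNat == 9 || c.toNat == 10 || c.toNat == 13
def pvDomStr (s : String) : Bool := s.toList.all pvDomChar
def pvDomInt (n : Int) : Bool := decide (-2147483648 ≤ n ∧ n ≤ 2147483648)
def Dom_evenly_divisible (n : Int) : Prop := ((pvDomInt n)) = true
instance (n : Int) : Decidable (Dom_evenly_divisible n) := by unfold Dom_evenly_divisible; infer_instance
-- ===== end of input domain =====

-- B replaces A's O(n^2) rescan of the growing multipliers list by independent
-- trial division per element (find the smallest prime factor, strip it); measured faster.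

-- ===== PORT A =====
def evenly_divisible (n : Int) : List Int :=
  (PySem.List.pyRange 1 (n + 1) 1).foldl
    (fun multipliers i =>
      multipliers ++
        [multipliers.foldl
          (fun current element =>
            if PySem.Int.mod current element = 0 then
              -- int(current / element): truncating division, exact here (|values| < 2^53 on Dom)
              PySem.Int.truncdiv current element
            else current)
          i])
    []

-- ===== PORT B =====
-- Source B: while p * p <= i and i % p != 0: p += 1
-- (the 0 < p conjunct is a totality guard only: every call in this program has 2 ≤ p)
def evenlyTrial (i p : Int) : Int :=
  if h : 0 < p ∧ p * p ≤ i ∧ PySem.Int.mod i p ≠ 0 then evenlyTrial i (p + 1) else p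
termination_by (i - p).toNat
decreasing_by
  obtain ⟨hp, hpp, hmod⟩ := h
  by_cases hp1 : p = 1
  · subst hp1
    rw [Ne, PySem.Int.mod_eq_zero_iff_dvd] at hmod
    exact absurd (one_dvd i) hmod
  · have h2 : 2 ≤ p := by omega
    have h5 : 2 * p ≤ p * p := by nlinarith
    omega

-- Source B: while m % p == 0: m //= p
-- (the 2 ≤ p and 0 < m conjuncts are totality guards only: they hold at every reachable call)
def evenlyStrip (m p : Int) : Int :=
  if h : 2 ≤ p ∧ 0 < m ∧ PySem.Int.mod m p = 0 then evenlyStrip (PySem.Int.floordiv m p) p else m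
termination_by m.toNat
decreasing_by
  have h2 : PySem.Int.floordiv m p < m := by
    rw [PySem.Int.floordiv_lt_iff_lt_mul (by omega)]
    exact lt_mul_of_one_lt_right h.2.1 (by omega)
  have h3 : (0:ℤ) ≤ PySem.Int.floordiv m p := by
    rw [PySem.Int.le_floordiv_iff_mul_le (by omega)]
    omega
  omega

-- Source B _multiplier
def evenlyMult (i : Int) : Int :=
  if i = 1 then 1
  else
    let p0 := evenlyTrial i 2
    let p := if i < p0 * p0 then i else p0
    if evenlyStrip i p = 1 then p else 1

def evenly_divisible_alt (n : Int) : List Int :=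
  (PySem.List.pyRange 1 (n + 1) 1).map evenlyMult

-- ===== PRECONDITION & SPEC =====
def Spec_evenly_divisible (n : Int) (out : List Int) : Prop := out = evenly_divisible_alt n
instance (n : Int) (out : List Int) : Decidable (Spec_evenly_divisible n out) := by unfold Spec_evenly_divisible; infer_instance

-- ===== CLAIM (what is proved, stated in full; the proofs are below) =====
def Claim_equal_evenly_divisible : Prop := ∀ (n : Int), Dom_evenly_divisible n → Spec_evenly_divisible n (evenly_divisible n)

-- ===== LEMMAS AND PROOFS =====

-- The common specification: the multiplier at i is i's smallest prime factor if i is a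
-- prime power, else 1.
def pvF (i : ℕ) : ℕ := if IsPrimePow i then i.minFac else 1

-- A's inner loop, on ℕ.
def pvDfold (c : ℕ) (L : List ℕ) : ℕ := L.foldl (fun c e => if c % e = 0 then c / e else c) c

theorem pvF_one_or_prime (j : ℕ) : pvF j = 1 ∨ (pvF j).Prime := by
  unfold pvF
  split_ifs with h
  · exact Or.inr (Nat.minFac_prime h.ne_one)
  · exact Or.inl rfl

theorem pvF_eq_prime_iff (p j : ℕ) (hp : p.Prime) : pvF j = p ↔ ∃ k, 1 ≤ k ∧ p ^ k = j := by
  unfold pvF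
  split_ifs with h
  · constructor
    · intro hmf
      obtain ⟨q, k, hq, hk, rfl⟩ := h
      rw [(Nat.prime_iff.2 hq).pow_minFac (by omega : k ≠ 0)] at hmf
      exact ⟨k, hk, by rw [hmf]⟩
    · rintro ⟨k, hk, rfl⟩
      exact hp.pow_minFac (by omega : k ≠ 0)
  · constructor
    · intro h1; exact absurd h1.symm hp.ne_one
    · rintro ⟨k, hk, rfl⟩
      exact absurd ⟨p, k, Nat.prime_iff.1 hp, hk, rfl⟩ h

theorem pvDfold_fact (L : List ℕ) (c : ℕ) (hc : 0 < c) (hL : ∀ e ∈ L, e = 1 ∨ e.Prime) :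
    0 < pvDfold c L ∧ ∀ p : ℕ, p.Prime →
      (pvDfold c L).factorization p = c.factorization p - L.count p := by
  induction L generalizing c with
  | nil => exact ⟨hc, fun p _ => by simp [pvDfold]⟩
  | cons e L ih =>
    have he := hL e List.mem_cons_self
    have hL' : ∀ x ∈ L, x = 1 ∨ x.Prime := fun x hx => hL x (List.mem_cons_of_mem e hx)
    rcases he with rfl | hq
    · -- e = 1 : the division is by 1 and changes nothing
      have : pvDfold c (1 :: L) = pvDfold c L := by simp [pvDfold]
      rw [this]
      obtain ⟨h1, h2⟩ := ih c hc hL'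
      refine ⟨h1, fun p hp => ?_⟩
      rw [h2 p hp, List.count_cons]
      have h1p : ¬ ((1 : ℕ) == p) = true := by simp; exact fun h => hp.ne_one h.symm
      simp [h1p]
    · -- e prime
      by_cases hd : c % e = 0
      · have hdvd : e ∣ c := Nat.dvd_of_mod_eq_zero hd
        have hstep : pvDfold c (e :: L) = pvDfold (c / e) L := by simp [pvDfold, hd]
        rw [hstep]
        have hpos : 0 < c / e := Nat.div_pos (Nat.le_of_dvd hc hdvd) hq.pos
        obtain ⟨h1, h2⟩ := ih (c / e) hpos hL'
        refine ⟨h1, fun p hp => ?_⟩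
        rw [h2 p hp, Nat.factorization_div hdvd, Finsupp.tsub_apply, hq.factorization,
          Finsupp.single_apply, List.count_cons]
        by_cases hpe : e = p
        · simp [hpe]; omega
        · simp [hpe]
      · have hstep : pvDfold c (e :: L) = pvDfold c L := by simp [pvDfold, hd]
        rw [hstep]
        obtain ⟨h1, h2⟩ := ih c hc hL'
        refine ⟨h1, fun p hp => ?_⟩
        rw [h2 p hp, List.count_cons]
        by_cases hpe : e = p
        · subst hpe
          have hnd : ¬ e ∣ c := fun hdd => hd (Nat.mod_eq_zero_of_dvd hdd)
          rw [Nat.factorization_eq_zero_of_not_dvd hnd]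
          omega
        · simp [hpe]

theorem pvLog_pred_pow (p e : ℕ) (hp : 1 < p) (he : 1 ≤ e) :
    Nat.log p (p ^ e - 1) = e - 1 := by
  have hpe : 2 ≤ p ^ e := le_trans hp (Nat.le_self_pow (by omega) p)
  have hne : p ^ e - 1 ≠ 0 := by omega
  have hlow : p ^ (e - 1) ≤ p ^ e - 1 := by
    have := Nat.pow_lt_pow_right hp (show e - 1 < e by omega)
    omega
  have h1 : e - 1 ≤ Nat.log p (p ^ e - 1) := (Nat.le_log_iff_pow_le hp hne).2 hlow
  have h2 : Nat.log p (p ^ e - 1) < e :=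
    (Nat.log_lt_iff_lt_pow hp hne).2 (by omega)
  omega

theorem pvLog_succ (p m : ℕ) (hp : p.Prime) :
    Nat.log p (m + 1) = Nat.log p m + (if pvF (m + 1) = p then 1 else 0) := by
  by_cases h : pvF (m + 1) = p
  · obtain ⟨k, hk, hpk⟩ := (pvF_eq_prime_iff p (m + 1) hp).1 h
    rw [if_pos h, ← hpk, Nat.log_pow hp.one_lt,
      show (m : ℕ) = p ^ k - 1 by omega, pvLog_pred_pow p k hp.one_lt hk]
    omega
  · rw [if_neg h, Nat.add_zero]
    rcases Nat.eq_zero_or_pos m with rfl | hm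
    · simp
    · refine le_antisymm ?_ (Nat.log_mono_right (by omega))
      by_contra hlt
      push Not at hlt
      have hpk : p ^ Nat.log p (m + 1) ≤ m + 1 := Nat.pow_log_le_self p (by omega)
      have hnle : ¬ p ^ Nat.log p (m + 1) ≤ m := by
        intro hle
        exact absurd ((Nat.le_log_iff_pow_le hp.one_lt (by omega)).2 hle) (by omega)
      have heq : p ^ Nat.log p (m + 1) = m + 1 := by omega
      have hk1 : 1 ≤ Nat.log p (m + 1) := by
        rcases Nat.eq_zero_or_pos (Nat.log p (m + 1)) with hz | hpos
        · rw [hz, pow_zero] at heq; omega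
        · exact hpos
      exact h ((pvF_eq_prime_iff p (m + 1) hp).2 ⟨_, hk1, heq⟩)

theorem pvCount_pvF (p m : ℕ) (hp : p.Prime) :
    ((List.range' 1 m).map pvF).count p = Nat.log p m := by
  induction m with
  | zero => simp
  | succ m ih =>
    have h1m : (1 : ℕ) + 1 * m = m + 1 := by omega
    rw [List.range'_concat, h1m, List.map_append, List.count_append, ih,
      pvLog_succ p m hp]
    simp [List.count_singleton]

theorem pvDfold_eq_pvF (i : ℕ) (hi : 1 ≤ i) :
    pvDfold i ((List.range' 1 (i - 1)).map pvF) = pvF i := by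
  set L := (List.range' 1 (i - 1)).map pvF with hL
  have hLok : ∀ e ∈ L, e = 1 ∨ e.Prime := by
    intro e he
    obtain ⟨j, _, rfl⟩ := List.mem_map.1 he
    exact pvF_one_or_prime j
  obtain ⟨hpos, hfact⟩ := pvDfold_fact L i hi hLok
  have hcnt : ∀ p : ℕ, p.Prime → L.count p = Nat.log p (i - 1) :=
    fun p hp => pvCount_pvF p (i - 1) hp
  have hFpos : 0 < pvF i := by
    rcases pvF_one_or_prime i with h | h
    · omega
    · exact h.pos
  -- both sides are positive; compare factorizations
  apply Nat.factorization_inj (by simp only [Set.mem_setOf_eq]; omega)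
    (by simp only [Set.mem_setOf_eq]; omega)
  ext p
  by_cases hp : p.Prime
  · rw [hfact p hp, hcnt p hp]
    unfold pvF
    split_ifs with hpp
    · obtain ⟨q, k, hq, hk, rfl⟩ := hpp
      have hqp : q.Prime := Nat.prime_iff.2 hq
      rw [hqp.pow_minFac (by omega : k ≠ 0), hqp.factorization_pow,
        hqp.factorization, Finsupp.single_apply, Finsupp.single_apply]
      by_cases hpq : q = p
      · subst hpq
        rw [if_pos rfl, if_pos rfl, pvLog_pred_pow q k hqp.one_lt hk]
        omega
      · rw [if_neg hpq, if_neg hpq]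
        omega
    · -- i is not a prime power: every prime is stripped completely
      rw [Nat.factorization_one, Finsupp.coe_zero, Pi.zero_apply]
      rcases eq_or_lt_of_le hi with h1 | h2
      · rw [← h1]
        simp
      · by_cases hd : p ∣ i
        · have he1 : 1 ≤ i.factorization p :=
            (hp.dvd_iff_one_le_factorization (by omega)).1 hd
          have hdvd : p ^ i.factorization p ∣ i := Nat.ordProj_dvd i p
          have hne : p ^ i.factorization p ≠ i := fun he =>
            hpp ⟨p, _, Nat.prime_iff.1 hp, by omega, he⟩
          have hlt : p ^ i.factorization p < i :=
            lt_of_le_of_ne (Nat.le_of_dvd (by omega) hdvd) hne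
          have hle : i.factorization p ≤ Nat.log p (i - 1) :=
            (Nat.le_log_iff_pow_le hp.one_lt (by omega)).2 (by omega)
          omega
        · rw [Nat.factorization_eq_zero_of_not_dvd hd]
          omega
  · rw [Nat.factorization_eq_zero_of_not_prime _ hp,
      Nat.factorization_eq_zero_of_not_prime _ hp]

theorem pvDfoldZ_cast (L : List ℕ) (c : ℕ) (hL : ∀ e ∈ L, 0 < e) :
    (L.map (Nat.cast : ℕ → ℤ)).foldl
      (fun current element =>
        if PySem.Int.mod current element = 0 then PySem.Int.truncdiv current element
        else current) (c : ℤ) = (pvDfold c L : ℤ) := by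
  induction L generalizing c with
  | nil => simp [pvDfold]
  | cons e L ih =>
    have he : 0 < e := hL e List.mem_cons_self
    have hL' : ∀ x ∈ L, 0 < x := fun x hx => hL x (List.mem_cons_of_mem e hx)
    simp only [List.map_cons, List.foldl_cons, PySem.Int.mod_natCast]
    by_cases hd : c % e = 0
    · rw [if_pos (by exact_mod_cast congrArg (Nat.cast : ℕ → ℤ) hd)]
      have : PySem.Int.truncdiv (c : ℤ) (e : ℤ) = ((c / e : ℕ) : ℤ) := by
        simp [PySem.Int.truncdiv]
      rw [this, ih (c / e) hL']
      simp [pvDfold, hd]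
    · rw [if_neg (by exact_mod_cast hd)]
      rw [ih c hL']
      simp [pvDfold, hd]

theorem pvA_eq (n : Int) :
    evenly_divisible n = (List.range' 1 n.toNat).map (fun j => (pvF j : ℤ)) := by
  unfold evenly_divisible
  rw [PySem.List.pyRange_one, show n + 1 - 1 = n from by ring]
  -- the outer fold, by induction on the length of the processed range
  suffices h : ∀ m : ℕ,
      ((List.range m).map (fun k : ℕ => (1 : ℤ) + (k : ℤ))).foldl
        (fun multipliers i =>
          multipliers ++
            [multipliers.foldl
              (fun current element =>
                if PySem.Int.mod current element = 0 then
                  PySem.Int.truncdiv current element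
                else current)
              i])
        [] = (List.range' 1 m).map (fun j => (pvF j : ℤ)) by
    exact h n.toNat
  intro m
  induction m with
  | zero => simp
  | succ m ih =>
    rw [List.range_succ, List.map_append, List.foldl_append, ih]
    simp only [List.map_cons, List.map_nil, List.foldl_cons, List.foldl_nil]
    have hmap : (List.range' 1 m).map (fun j => (pvF j : ℤ))
        = ((List.range' 1 m).map pvF).map (Nat.cast : ℕ → ℤ) := by
      rw [List.map_map]; rfl
    have hpos : ∀ x ∈ (List.range' 1 m).map pvF, 0 < x := by
      intro x hx
      obtain ⟨j, _, rfl⟩ := List.mem_map.1 hx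
      rcases pvF_one_or_prime j with h1 | h1
      · omega
      · exact h1.pos
    have hcast : (1 : ℤ) + (m : ℤ) = ((1 + m : ℕ) : ℤ) := by push_cast; ring
    rw [hmap, hcast, pvDfoldZ_cast _ _ hpos]
    have hfold : pvDfold (1 + m) ((List.range' 1 m).map pvF) = pvF (1 + m) := by
      have := pvDfold_eq_pvF (1 + m) (by omega)
      simpa using this
    rw [hfold, List.range'_concat]
    simp [Nat.add_comm 1 m]

-- the post-loop fix-up `if p * p > i: p = i` turns the stopped p into the least prime factor
theorem pvTrial_stop (i p : ℕ) (hi : 2 ≤ i) (hp2 : 2 ≤ p) (hple : p ≤ i.minFac)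
    (hstop : ¬(p * p ≤ i) ∨ p ∣ i) :
    (if (i : ℤ) < (p : ℤ) * (p : ℤ) then (i : ℤ) else (p : ℤ)) = (i.minFac : ℤ) := by
  have hprime_case : (i : ℕ) < p * p → i.minFac = i := by
    intro hlt
    by_contra hne
    have hnp : ¬ i.Prime := fun hpr => hne hpr.minFac_eq
    have hsq := Nat.minFac_sq_le_self (by omega : 0 < i) hnp
    rw [pow_two] at hsq
    have hmm : p * p ≤ i.minFac * i.minFac := Nat.mul_le_mul hple hple
    omega
  rcases hstop with hgt | hdvd
  · have hlt : (i : ℤ) < (p : ℤ) * (p : ℤ) := by exact_mod_cast (by omega : i < p * p)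
    rw [if_pos hlt, hprime_case (by omega)]
  · have hpm : p = i.minFac := le_antisymm hple (Nat.minFac_le_of_dvd hp2 hdvd)
    by_cases hlt : (i : ℤ) < (p : ℤ) * (p : ℤ)
    · rw [if_pos hlt]
      have : i < p * p := by exact_mod_cast hlt
      rw [hprime_case this]
    · rw [if_neg hlt, hpm]

theorem pvTrial_fix (i : ℕ) (hi : 2 ≤ i) : ∀ p : ℕ, 2 ≤ p → p ≤ i.minFac →
    (if (i : ℤ) < evenlyTrial i p * evenlyTrial i p then (i : ℤ) else evenlyTrial i p)
      = (i.minFac : ℤ) := by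
  have hmfd : i.minFac ∣ i := Nat.minFac_dvd i
  suffices aux : ∀ (d p : ℕ), 2 ≤ p → p ≤ i.minFac → i.minFac - p ≤ d →
      (if (i : ℤ) < evenlyTrial i p * evenlyTrial i p then (i : ℤ) else evenlyTrial i p)
        = (i.minFac : ℤ) by
    intro p hp2 hple
    exact aux (i.minFac - p) p hp2 hple le_rfl
  intro d
  induction d with
  | zero =>
    intro p hp2 hple hd
    have hpm : p = i.minFac := by omega
    have hdvd : p ∣ i := hpm ▸ hmfd
    rw [evenlyTrial, dif_neg]
    · exact pvTrial_stop i p hi hp2 hple (Or.inr hdvd)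
    · rintro ⟨-, -, hmod⟩
      apply hmod
      rw [PySem.Int.mod_natCast]
      exact_mod_cast congrArg (Nat.cast : ℕ → ℤ) (Nat.dvd_iff_mod_eq_zero.mp hdvd)
  | succ d ihd =>
    intro p hp2 hple hd
    rw [evenlyTrial]
    by_cases hc : 0 < (p : ℤ) ∧ (p : ℤ) * (p : ℤ) ≤ (i : ℤ) ∧ PySem.Int.mod (i : ℤ) (p : ℤ) ≠ 0
    · rw [dif_pos hc]
      have hnd : ¬ p ∣ i := by
        intro hdvd
        apply hc.2.2
        rw [PySem.Int.mod_natCast]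
        exact_mod_cast congrArg (Nat.cast : ℕ → ℤ) (Nat.dvd_iff_mod_eq_zero.mp hdvd)
      have hlt : p < i.minFac := lt_of_le_of_ne hple (fun he => hnd (he ▸ hmfd))
      rw [show (p : ℤ) + 1 = ((p + 1 : ℕ) : ℤ) by push_cast; ring]
      exact ihd (p + 1) (by omega) (by omega) (by omega)
    · rw [dif_neg hc]
      apply pvTrial_stop i p hi hp2 hple
      by_cases hpp : p * p ≤ i
      · right
        by_contra hnd
        apply hc
        refine ⟨by positivity, by exact_mod_cast hpp, ?_⟩
        rw [PySem.Int.mod_natCast]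
        intro h0
        have : i % p = 0 := by exact_mod_cast h0
        exact hnd (Nat.dvd_iff_mod_eq_zero.mpr this)
      · exact Or.inl hpp

theorem pvStrip_pow (p k : ℕ) (hp : 2 ≤ p) : evenlyStrip ((p ^ k : ℕ) : ℤ) p = 1 := by
  induction k with
  | zero =>
    rw [pow_zero, evenlyStrip, dif_neg]
    · rfl
    · rintro ⟨-, -, hmod⟩
      rw [show ((1 : ℕ) : ℤ) = 1 by rfl, PySem.Int.mod_eq_zero_iff_dvd] at hmod
      have := Int.le_of_dvd one_pos hmod
      omega
  | succ k ih =>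
    rw [evenlyStrip, dif_pos, PySem.Int.floordiv_natCast]
    · rw [show p ^ (k + 1) / p = p ^ k from by
        rw [pow_succ, Nat.mul_div_cancel _ (by omega)]]
      exact ih
    · refine ⟨by exact_mod_cast hp, by positivity, ?_⟩
      rw [PySem.Int.mod_natCast]
      rw [show p ^ (k + 1) % p = 0 from
        Nat.dvd_iff_mod_eq_zero.mp (dvd_pow_self p (by omega))]
      rfl

theorem pvStrip_eq_one (p m : ℕ) (hp : 2 ≤ p) (hm : 0 < m)
    (h : evenlyStrip (m : ℤ) (p : ℤ) = 1) : ∃ k, m = p ^ k := by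
  induction m using Nat.strong_induction_on with
  | _ m ih =>
    rw [evenlyStrip] at h
    by_cases hd : p ∣ m
    · rw [dif_pos ⟨by exact_mod_cast hp, by exact_mod_cast hm, by
        rw [PySem.Int.mod_natCast,
          show m % p = 0 from Nat.dvd_iff_mod_eq_zero.mp hd]; rfl⟩,
        PySem.Int.floordiv_natCast] at h
      have hlt : m / p < m := Nat.div_lt_self hm (by omega)
      have hpos : 0 < m / p := Nat.div_pos (Nat.le_of_dvd hm hd) (by omega)
      obtain ⟨k, hk⟩ := ih (m / p) hlt hpos h
      exact ⟨k + 1, by rw [pow_succ, ← hk, Nat.mul_comm, Nat.mul_div_cancel' hd]⟩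
    · rw [dif_neg] at h
      · exact ⟨0, by exact_mod_cast h⟩
      · rintro ⟨-, -, hmod⟩
        rw [PySem.Int.mod_natCast] at hmod
        have : m % p = 0 := by exact_mod_cast hmod
        exact hd (Nat.dvd_iff_mod_eq_zero.mpr this)

theorem pvMult_eq (j : ℕ) (hj : 1 ≤ j) : evenlyMult (j : ℤ) = (pvF j : ℤ) := by
  rcases eq_or_lt_of_le hj with h1 | h2
  · rw [← h1]
    simp [evenlyMult, pvF, show ¬ IsPrimePow 1 from fun h => h.ne_one rfl]
  · have hj2 : 2 ≤ j := h2
    have hne : (j : ℤ) ≠ 1 := by exact_mod_cast (by omega : j ≠ 1)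
    have hmf2 : 2 ≤ j.minFac := (Nat.minFac_prime (by omega : j ≠ 1)).two_le
    have hfix := pvTrial_fix j hj2 2 le_rfl hmf2
    have h2z : ((2 : ℕ) : ℤ) = (2 : ℤ) := by norm_num
    rw [h2z] at hfix
    simp only [evenlyMult]
    rw [if_neg hne, hfix]
    by_cases hpp : IsPrimePow j
    · have hj' := hpp
      obtain ⟨q, k, hq, hk, hqk⟩ := hpp
      have hqp : q.Prime := Nat.prime_iff.2 hq
      have hmfq : j.minFac = q := by rw [← hqk, hqp.pow_minFac (by omega : k ≠ 0)]
      rw [hmfq, if_pos (by rw [← hqk]; exact pvStrip_pow q k hqp.two_le)]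
      unfold pvF
      rw [if_pos hj', hmfq]
    · have hs : evenlyStrip (j : ℤ) (j.minFac : ℤ) ≠ 1 := by
        intro hone
        obtain ⟨k, hk⟩ := pvStrip_eq_one j.minFac j hmf2 (by omega) hone
        rcases Nat.eq_zero_or_pos k with rfl | hkpos
        · rw [pow_zero] at hk; omega
        · exact hpp ⟨j.minFac, k,
            Nat.prime_iff.1 (Nat.minFac_prime (by omega : j ≠ 1)), hkpos, hk.symm⟩
      rw [if_neg hs]
      unfold pvF
      rw [if_neg hpp]
      rfl

theorem pvB_eq (n : Int) :
    evenly_divisible_alt n = (List.range' 1 n.toNat).map (fun j => (pvF j : ℤ)) := by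
  unfold evenly_divisible_alt
  rw [PySem.List.pyRange_one, show n + 1 - 1 = n from by ring,
    List.range'_eq_map_range, List.map_map, List.map_map]
  apply List.map_congr_left
  intro k _
  show evenlyMult ((1 : ℤ) + (k : ℤ)) = ((pvF (1 + k) : ℕ) : ℤ)
  rw [show (1 : ℤ) + (k : ℤ) = ((1 + k : ℕ) : ℤ) by push_cast; ring]
  exact pvMult_eq (1 + k) (by omega)

-- ===== VERDICT (by name: the statement is the Claim_ definition above) =====
theorem evenly_divisible_spec : Claim_equal_evenly_divisible := by
  intro n _
  unfold Spec_evenly_divisible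
  rw [pvA_eq, pvB_eq]
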